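-- pv_equiv track=rewrite | github.com/bhn26/Search-Algorithms-Python | BFS.py | poszero
-- ===== SOURCE A (Python) =====
-- def poszero(board):
-- 	tmp = [-1,-1]
-- 	dx = 0
-- 	dy = 0
-- 	for x in board:
-- 		for y in x:
-- 			if (y == 0):
-- 				tmp[0] = dx
-- 				tmp[1] = dy
-- 			dy = dy + 1
-- 		dy = 0
-- 		dx = dx + 1
-- 	return tmp
-- ===== SOURCE B (Python) =====
-- def poszero(board):
--     # Reverse row-major scan with early exit: the first zero seen from the end
--     # is the last zero in row-major order.
--     for i in range(len(board) - 1, -1, -1):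
--         row = board[i]
--         for j in range(len(row) - 1, -1, -1):
--             if row[j] == 0:
--                 return [i, j]
--     return [-1, -1]
-- ===== Notes on version B (the rewrite author's own statement) =====
-- stated objective: simpler
-- what changed: Replaces the forward full pass that keeps overwriting the last match with a reverse row-major scan that returns the first zero it meets (the row-major last zero) immediately.
import Mathlib
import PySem

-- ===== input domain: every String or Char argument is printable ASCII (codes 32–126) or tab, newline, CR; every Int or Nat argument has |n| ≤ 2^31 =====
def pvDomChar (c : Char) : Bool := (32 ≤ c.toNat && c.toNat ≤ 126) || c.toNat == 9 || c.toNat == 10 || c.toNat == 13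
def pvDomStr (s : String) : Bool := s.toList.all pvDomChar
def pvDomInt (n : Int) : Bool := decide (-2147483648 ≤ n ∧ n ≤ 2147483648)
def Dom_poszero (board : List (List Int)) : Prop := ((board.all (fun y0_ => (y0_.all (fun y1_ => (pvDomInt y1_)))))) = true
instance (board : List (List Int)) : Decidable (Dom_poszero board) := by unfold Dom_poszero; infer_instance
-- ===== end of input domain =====

-- B replaces A's forward overwrite-the-last-match full pass by a reverse row-major scan
-- that returns the first zero it meets (objective: simpler, early exit).

-- ===== PORT A =====
-- inner loop body: state ((tmp0, tmp1), dy), dx fixed for the row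
def stepInner (dx : Int) (st2 : (Int × Int) × Int) (y : Int) : (Int × Int) × Int :=
  if y = 0 then ((dx, st2.2), st2.2 + 1) else (st2.1, st2.2 + 1)

-- outer loop body: state ((tmp0, tmp1), dx); dy is reset to 0 per row
def stepOuter (st : (Int × Int) × Int) (x : List Int) : (Int × Int) × Int :=
  ((x.foldl (stepInner st.2) (st.1, 0)).1, st.2 + 1)

def poszero (board : List (List Int)) : List Int :=
  let s := board.foldl stepOuter ((-1, -1), 0)
  [s.1.1, s.1.2]

-- ===== PORT B =====
-- for j in range(len(row)-1, -1, -1): first (i.e. reversed-enumerate) index with a zero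
def rowScanB : List (Int × Int) → Option Int
  | [] => none
  | (j, y) :: rest => if y = 0 then some j else rowScanB rest

-- for i in range(len(board)-1, -1, -1): first row (from the end) containing a zero
def boardScanB : List (Int × List Int) → List Int
  | [] => [-1, -1]
  | (i, row) :: rest =>
    match rowScanB (PySem.List.enumerate row 0).reverse with
    | some j => [i, j]
    | none => boardScanB rest

def poszero_alt (board : List (List Int)) : List Int :=
  boardScanB (PySem.List.enumerate board 0).reverse

-- ===== PRECONDITION & SPEC =====
def Spec_poszero (board : List (List Int)) (out : List Int) : Prop := out = poszero_alt board
instance (board : List (List Int)) (out : List Int) : Decidable (Spec_poszero board out) := by unfold Spec_poszero; infer_instance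

-- ===== CLAIM (what is proved, stated in full; the proofs are below) =====
def Claim_equal_poszero : Prop := ∀ (board : List (List Int)), Dom_poszero board → Spec_poszero board (poszero board)

-- ===== LEMMAS AND PROOFS =====

-- last-zero coordinates, as an option, via the same reverse scan as port B
def lastZrev : List (Int × List Int) → Option (Int × Int)
  | [] => none
  | (i, row) :: rest =>
    match rowScanB (PySem.List.enumerate row 0).reverse with
    | some j => some (i, j)
    | none => lastZrev rest

lemma boardScanB_eq (l : List (Int × List Int)) :
    boardScanB l = match lastZrev l with
      | some (i, j) => [i, j]
      | none => [-1, -1] := by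
  induction l with
  | nil => rfl
  | cons p rest ih =>
    obtain ⟨i, row⟩ := p
    simp only [boardScanB, lastZrev]
    cases rowScanB (PySem.List.enumerate row 0).reverse <;> simp [ih]

lemma rowFold (x : List Int) (t : Int × Int) (dx : Int) :
    x.foldl (stepInner dx) (t, 0) =
      ((match rowScanB (PySem.List.enumerate x 0).reverse with
        | some j => (dx, j)
        | none => t), (x.length : Int)) := by
  induction x using List.reverseRecOn with
  | nil => rfl
  | append_singleton x y ih =>
    rw [List.foldl_append, ih]
    rw [PySem.List.enumerate_append]
    simp only [PySem.List.enumerate, List.reverse_append]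
    by_cases hy : y = 0 <;>
      cases h : rowScanB (PySem.List.enumerate x 0).reverse <;>
        simp [stepInner, rowScanB, hy, h]

lemma outerFold (board : List (List Int)) (t : Int × Int) :
    board.foldl stepOuter (t, 0) =
      ((match lastZrev (PySem.List.enumerate board 0).reverse with
        | some p => p
        | none => t), (board.length : Int)) := by
  induction board using List.reverseRecOn with
  | nil => rfl
  | append_singleton board x ih =>
    rw [List.foldl_append, ih]
    rw [PySem.List.enumerate_append]
    simp only [PySem.List.enumerate, List.reverse_append]
    simp only [List.foldl_cons, List.foldl_nil, stepOuter, rowFold]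
    cases hr : rowScanB (PySem.List.enumerate x 0).reverse <;>
      cases hl : lastZrev (PySem.List.enumerate board 0).reverse <;>
        simp [lastZrev, hr, hl]

-- ===== VERDICT (by name: the statement is the Claim_ definition above) =====
theorem poszero_spec : Claim_equal_poszero := by
  intro board _
  show poszero board = poszero_alt board
  rw [poszero, poszero_alt, boardScanB_eq, outerFold]
  cases h : lastZrev (PySem.List.enumerate board 0).reverse with
  | none => rfl
  | some p => obtain ⟨i, j⟩ := p; rfl
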